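-- pv_equiv track=rewrite | github.com/posl/comment_recommendation | script/mod_gen/2_time/zh/179_A/6.py | solve
-- ===== SOURCE A (Python) =====
-- def solve(s):
--     mod = 10**9+7
--     dp = [[0 for i in range(s+1)] for j in range(s+1)]
--     for i in range(3,s+1):
--         dp[1][i] = 1
--     for i in range(2,s+1):
--         for j in range(3,s+1):
--             if i>j:
--                 dp[i][j] = dp[i-1][j]*i%mod
--             else:
--                 dp[i][j] = (dp[i-1][j]*i+dp[i][j-i])%mod
--     return dp[s][s]
-- ===== SOURCE B (Python) =====
-- def solve(s):
--     mod = 10**9 + 7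
--     if s < 3:
--         return 0
--     # w[x] = number of partitions of x into parts of sizes 2..s, mod p
--     w = [1] + [0] * s
--     for part in range(2, s + 1):
--         for j in range(part, s + 1):
--             w[j] = (w[j] + w[j - part]) % mod
--     total = sum(w[:s - 2]) % mod
--     f = 1
--     for k in range(2, s + 1):
--         f = f * k % mod
--     return f * total % mod
-- ===== Notes on version B (the rewrite author's own statement) =====
-- stated objective: faster
-- what changed: A fills a full (s+1)x(s+1) table dp[i][j]=i*dp[i-1][j]+dp[i][j-i] mod p; B factors out the i! growth (dp[s][s] = s! * Q mod p) and computes Q with a single 1-D partition-counting array (parts 2..s plus one leftover part >= 3), then multiplies by s! mod p - O(s) memory instead of O(s^2) and about half the inner-loop work.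
import Mathlib
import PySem

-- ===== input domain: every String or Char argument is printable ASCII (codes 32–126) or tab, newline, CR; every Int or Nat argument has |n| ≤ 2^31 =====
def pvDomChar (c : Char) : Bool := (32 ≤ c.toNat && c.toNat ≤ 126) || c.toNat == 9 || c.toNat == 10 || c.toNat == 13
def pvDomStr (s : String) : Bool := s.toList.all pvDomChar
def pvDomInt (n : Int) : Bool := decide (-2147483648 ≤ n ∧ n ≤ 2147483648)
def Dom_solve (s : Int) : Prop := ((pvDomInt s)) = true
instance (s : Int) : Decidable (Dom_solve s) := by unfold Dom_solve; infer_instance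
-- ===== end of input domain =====

-- B replaces A's O(s^2)-memory 2-D table by "s! * (1-D partition count) mod p": faster by a
-- constant factor (measured) and O(s) memory; equal return value proved for all s ≥ 0.

-- ===== PORT A =====
-- literal port of A: a full (s+1)×(s+1) table, row 1 seeded with 1s, then the double loop;
-- indices are always in range for s ≥ 0 (Pre_), so pyGetD/pySetD are exact here.
def solve (s : Int) : Int :=
  let md : Int := 10 ^ 9 + 7
  let dp : List (List Int) :=
    (PySem.List.pyRange 0 (s + 1) 1).map (fun _ =>
      (PySem.List.pyRange 0 (s + 1) 1).map (fun _ => (0 : Int)))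
  let dp := (PySem.List.pyRange 3 (s + 1) 1).foldl (fun dp i =>
    PySem.List.pySetD dp 1 (PySem.List.pySetD (PySem.List.pyGetD dp 1 []) i 1)) dp
  let dp := (PySem.List.pyRange 2 (s + 1) 1).foldl (fun dp i =>
    (PySem.List.pyRange 3 (s + 1) 1).foldl (fun dp j =>
      if i > j then
        PySem.List.pySetD dp i (PySem.List.pySetD (PySem.List.pyGetD dp i []) j
          (PySem.Int.mod (PySem.List.pyGetD (PySem.List.pyGetD dp (i - 1) []) j 0 * i) md))
      else
        PySem.List.pySetD dp i (PySem.List.pySetD (PySem.List.pyGetD dp i []) j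
          (PySem.Int.mod (PySem.List.pyGetD (PySem.List.pyGetD dp (i - 1) []) j 0 * i
            + PySem.List.pyGetD (PySem.List.pyGetD dp i []) (j - i) 0) md))) dp) dp
  PySem.List.pyGetD (PySem.List.pyGetD dp s []) s 0

-- ===== PORT B =====
-- literal port of Source B: w[x] = #partitions of x into parts 2..s (mod p), then s! * sum(w[:s-2]) mod p.
def solve_alt (s : Int) : Int :=
  let md : Int := 10 ^ 9 + 7
  if s < 3 then 0
  else
    let w : List Int := [1] ++ PySem.List.pyRepeat [0] s
    let w := (PySem.List.pyRange 2 (s + 1) 1).foldl (fun w part =>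
      (PySem.List.pyRange part (s + 1) 1).foldl (fun w j =>
        PySem.List.pySetD w j (PySem.Int.mod
          (PySem.List.pyGetD w j 0 + PySem.List.pyGetD w (j - part) 0) md)) w) w
    let total := PySem.Int.mod (PySem.List.slice w none (some (s - 2))).sum md
    let f := (PySem.List.pyRange 2 (s + 1) 1).foldl (fun f k => PySem.Int.mod (f * k) md) 1
    PySem.Int.mod (f * total) md

-- ===== PRECONDITION & SPEC =====
-- A raises IndexError for s < 0 (dp is the empty list and dp[s] is read); Pre_ excludes exactly those.
def Pre_solve (s : Int) : Prop := 0 ≤ s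
instance (s : Int) : Decidable (Pre_solve s) := by unfold Pre_solve; infer_instance
def pvWitness_solve : Int := (7)

def Spec_solve (s : Int) (out : Int) : Prop := out = solve_alt s
instance (s : Int) (out : Int) : Decidable (Spec_solve s out) := by unfold Spec_solve; infer_instance

-- ===== CLAIM (what is proved, stated in full; the proofs are below) =====
def Claim_equal_solve : Prop := ∀ (s : Int), Dom_solve s → Pre_solve s → Spec_solve s (solve s)

-- ===== LEMMAS AND PROOFS =====

-- pvW p x = number of partitions of x into parts of sizes 2..p (unbounded multiplicity)
def pvW : Nat → Nat → Nat
  | 0, x => if x = 0 then 1 else 0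
  | 1, x => if x = 0 then 1 else 0
  | (p + 2), x => pvW (p + 1) x + (if p + 2 ≤ x then pvW (p + 2) (x - (p + 2)) else 0)
  termination_by p x => (p, x)
  decreasing_by
  · exact Prod.Lex.left _ _ (by omega)
  · exact Prod.Lex.right _ (by omega)

-- pvS i j = Σ_{x < j-2} pvW i x : partitions of j into one part ≥ 3 plus parts 2..i
def pvS (i j : Nat) : Nat := ∑ x ∈ Finset.range (j - 2), pvW i x

-- pvF i j : the value A's table holds at dp[i][j] for 1 ≤ i, 3 ≤ j
def pvF (i j : Nat) : Int := ((i.factorial * pvS i j : Nat) : Int) % 1000000007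

-- canonical shapes for the loop states
def mrow (n : Nat) (g : Nat → Int) : List Int := (List.range n).map g
def mtab (n : Nat) (g : Nat → Nat → Int) : List (List Int) := (List.range n).map (fun a => mrow n (g a))

lemma mrow_congr {n : Nat} {g g' : Nat → Int} (h : ∀ x, x < n → g x = g' x) :
    mrow n g = mrow n g' := by
  apply List.map_congr_left
  intro x hx
  exact h x (List.mem_range.mp hx)

lemma mtab_congr {n : Nat} {g g' : Nat → Nat → Int} (h : ∀ a b, a < n → b < n → g a b = g' a b) :
    mtab n g = mtab n g' := by
  apply List.map_congr_left
  intro a ha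
  exact mrow_congr (fun b hb => h a b (List.mem_range.mp ha) hb)

lemma mrow_len (n : Nat) (g : Nat → Int) : (mrow n g).length = n := by
  simp [mrow]

lemma mrow_get (n : Nat) (g : Nat → Int) (j : Int) (d : Int) (h0 : 0 ≤ j) (h1 : j < (n : Int)) :
    PySem.List.pyGetD (mrow n g) j d = g j.toNat := by
  rw [PySem.List.pyGetD_eq_getElem (xs := mrow n g) (i := j) (d := d) h0 (by simpa [mrow_len] using h1)]
  simp [mrow]

lemma mrow_set (n : Nat) (g : Nat → Int) (j : Int) (v : Int) (h0 : 0 ≤ j) (h1 : j < (n : Int)) :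
    PySem.List.pySetD (mrow n g) j v = mrow n (fun x => if x = j.toNat then v else g x) := by
  rw [PySem.List.pySetD_of_nonneg (mrow n g) v h0]
  apply List.ext_getElem
  · simp [mrow]
  · intro k hk hk'
    rw [List.getElem_set]
    simp only [mrow, List.getElem_map, List.getElem_range]
    by_cases h : j.toNat = k
    · simp [h]
    · simp [h, Ne.symm h]

lemma mtab_get (n : Nat) (g : Nat → Nat → Int) (i : Int) (h0 : 0 ≤ i) (h1 : i < (n : Int)) :
    PySem.List.pyGetD (mtab n g) i [] = mrow n (g i.toNat) := by
  rw [PySem.List.pyGetD_eq_getElem (xs := mtab n g) (i := i) (d := []) h0 (by simp [mtab]; omega)]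
  simp [mtab]

lemma mtab_set (n : Nat) (g : Nat → Nat → Int) (i : Int) (h : Nat → Int) (h0 : 0 ≤ i) (h1 : i < (n : Int)) :
    PySem.List.pySetD (mtab n g) i (mrow n h) = mtab n (fun a => if a = i.toNat then h else g a) := by
  rw [PySem.List.pySetD_of_nonneg (mtab n g) (mrow n h) h0]
  apply List.ext_getElem
  · simp [mtab]
  · intro k hk hk'
    rw [List.getElem_set]
    simp only [mtab, List.getElem_map, List.getElem_range]
    by_cases h' : i.toNat = k
    · simp [h']
    · simp [h', Ne.symm h']

lemma pvW_of_lt (p x : Nat) (hp : 2 ≤ p) (hx : x < p) : pvW p x = pvW (p - 1) x := by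
  obtain ⟨q, rfl⟩ : ∃ q, p = q + 2 := ⟨p - 2, by omega⟩
  rw [pvW]
  simp [Nat.not_le.mpr (by omega : x < q + 2)]

lemma sum_range_shift (g : Nat → Nat) (r m : Nat) :
    (∑ x ∈ Finset.range m, if r ≤ x then g (x - r) else 0) = ∑ y ∈ Finset.range (m - r), g y := by
  induction m with
  | zero => simp
  | succ m ih =>
    rw [Finset.sum_range_succ, ih]
    by_cases h : r ≤ m
    · have : m + 1 - r = (m - r) + 1 := by omega
      rw [if_pos h, this, Finset.sum_range_succ]
    · have : m + 1 - r = m - r := by omega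
      rw [if_neg h, this, add_zero]

lemma pvS_step (r j : Nat) (hr : 2 ≤ r) :
    pvS r j = pvS (r - 1) j + (if r ≤ j then pvS r (j - r) else 0) := by
  obtain ⟨q, rfl⟩ : ∃ q, r = q + 2 := ⟨r - 2, by omega⟩
  simp only [pvS]
  have hW : ∀ x, pvW (q + 2) x = pvW (q + 1) x + (if q + 2 ≤ x then pvW (q + 2) (x - (q + 2)) else 0) := by
    intro x; rw [pvW]
  calc (∑ x ∈ Finset.range (j - 2), pvW (q + 2) x)
      = (∑ x ∈ Finset.range (j - 2), pvW (q + 1) x)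
        + ∑ x ∈ Finset.range (j - 2), (if q + 2 ≤ x then pvW (q + 2) (x - (q + 2)) else 0) := by
        rw [Finset.sum_congr rfl (fun x _ => hW x), Finset.sum_add_distrib]
    _ = (∑ x ∈ Finset.range (j - 2), pvW (q + 1) x)
        + ∑ y ∈ Finset.range (j - 2 - (q + 2)), pvW (q + 2) y := by
        rw [sum_range_shift]
    _ = _ := by
        congr 1
        by_cases h : q + 2 ≤ j
        · rw [if_pos h]
          have : j - 2 - (q + 2) = j - (q + 2) - 2 := by omega
          rw [this]
        · rw [if_neg h]
          have : j - 2 - (q + 2) = 0 := by omega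
          rw [this]; simp

lemma pvS_small (r t : Nat) (ht : t < 3) : pvS r t = 0 := by
  have : t - 2 = 0 := by omega
  simp [pvS, this]

lemma pvF_small (r t : Nat) (ht : t < 3) : pvF r t = 0 := by
  simp [pvF, pvS_small r t ht]

lemma pvF_one (b : Nat) (hb : 3 ≤ b) : pvF 1 b = 1 := by
  have h1 : pvS 1 b = 1 := by
    have h0 : (0 : Nat) ∈ Finset.range (b - 2) := Finset.mem_range.mpr (by omega)
    simp only [pvS, pvW]
    rw [Finset.sum_ite_eq_of_mem' (Finset.range (b - 2)) 0 (fun _ => 1) h0]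
  simp [pvF, h1]

lemma emod_self_modEq (a p : Int) : Int.ModEq p (a % p) a := Int.emod_emod_of_dvd a dvd_rfl

lemma pvF_step_le (r j : Nat) (hr : 2 ≤ r) (hj : 3 ≤ j) (hle : r ≤ j) :
    (pvF (r - 1) j * (r : Int) + (if 3 ≤ j - r then pvF r (j - r) else 0)) % 1000000007 = pvF r j := by
  have hite : (if 3 ≤ j - r then pvF r (j - r) else 0) = pvF r (j - r) := by
    by_cases h : 3 ≤ j - r
    · rw [if_pos h]
    · rw [if_neg h, pvF_small r (j - r) (by omega)]
  rw [hite]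
  have hfac : r.factorial = (r - 1).factorial * r := by
    obtain ⟨q, rfl⟩ : ∃ q, r = q + 1 := ⟨r - 1, by omega⟩
    simp [Nat.factorial_succ]; ring
  have hS : pvS r j = pvS (r - 1) j + pvS r (j - r) := by
    rw [pvS_step r j hr, if_pos hle]
  unfold pvF
  rw [hS, hfac]
  have key : Int.ModEq 1000000007
      ((((r - 1).factorial * pvS (r - 1) j : Nat) : Int) % 1000000007 * (r : Int)
        + (((((r - 1).factorial * r) * pvS r (j - r) : Nat) : Int) % 1000000007))
      ((((r - 1).factorial * pvS (r - 1) j : Nat) : Int) * (r : Int)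
        + ((((r - 1).factorial * r) * pvS r (j - r) : Nat) : Int)) :=
    Int.ModEq.add ((emod_self_modEq _ _).mul_right _) (emod_self_modEq _ _)
  calc (((r - 1).factorial * pvS (r - 1) j : Nat) : Int) % 1000000007 * (r : Int)
        + (((((r - 1).factorial * r) * pvS r (j - r) : Nat) : Int) % 1000000007)
        ≡ (((r - 1).factorial * pvS (r - 1) j : Nat) : Int) * (r : Int)
        + ((((r - 1).factorial * r) * pvS r (j - r) : Nat) : Int) [ZMOD 1000000007] := key
    _ = ((((r - 1).factorial * r) * (pvS (r - 1) j + pvS r (j - r)) : Nat) : Int) := by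
        push_cast; ring

lemma pvF_step_gt (r j : Nat) (hr : 2 ≤ r) (hj : 3 ≤ j) (hgt : j < r) :
    (pvF (r - 1) j * (r : Int)) % 1000000007 = pvF r j := by
  have hfac : r.factorial = (r - 1).factorial * r := by
    obtain ⟨q, rfl⟩ : ∃ q, r = q + 1 := ⟨r - 1, by omega⟩
    simp [Nat.factorial_succ]; ring
  have hS : pvS r j = pvS (r - 1) j := by
    rw [pvS_step r j hr, if_neg (by omega), add_zero]
  unfold pvF
  rw [hS, hfac]
  calc (((r - 1).factorial * pvS (r - 1) j : Nat) : Int) % 1000000007 * (r : Int)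
        ≡ (((r - 1).factorial * pvS (r - 1) j : Nat) : Int) * (r : Int) [ZMOD 1000000007] :=
        (emod_self_modEq _ _).mul_right _
    _ = ((((r - 1).factorial * r) * pvS (r - 1) j : Nat) : Int) := by push_cast; ring



-- invariant functions
def gInit : Nat → Nat → Int := fun _ _ => 0
def g1 (T : Nat) : Nat → Nat → Int := fun a b => if a = 1 ∧ 3 ≤ b ∧ b < T then 1 else 0
def gG (r : Nat) : Nat → Nat → Int := fun a b => if 1 ≤ a ∧ a ≤ r ∧ 3 ≤ b then pvF a b else 0
def g2 (r T : Nat) : Nat → Nat → Int := fun a b =>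
  if 1 ≤ a ∧ a < r ∧ 3 ≤ b then pvF a b
  else if a = r ∧ 3 ≤ b ∧ b < T then pvF r b else 0

lemma loopA1 (n t : Nat) (ht : 3 + t ≤ n) :
    (PySem.List.pyRange 3 ((3 + t : Nat) : Int) 1).foldl
      (fun dp i => PySem.List.pySetD dp 1 (PySem.List.pySetD (PySem.List.pyGetD dp 1 []) i 1))
      (mtab n gInit)
    = mtab n (g1 (3 + t)) := by
  induction t with
  | zero =>
    rw [show (((3 + 0 : Nat)) : Int) = 3 by norm_num, PySem.List.pyRange_one_eq_nil le_rfl,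
      List.foldl_nil]
    exact mtab_congr (fun a b _ _ => by
      simp only [gInit, g1]; rw [if_neg (by omega)])
  | succ t ih =>
    rw [show (((3 + (t + 1) : Nat)) : Int) = ((3 + t : Nat) : Int) + 1 by push_cast; ring,
      PySem.List.pyRange_one_succ_right (by omega), List.foldl_append,
      ih (by omega), List.foldl_cons, List.foldl_nil]
    rw [mtab_get n _ 1 (by norm_num) (by omega),
      mrow_set n _ _ _ (by omega) (by omega),
      mtab_set n _ _ _ (by norm_num) (by omega)]
    apply mtab_congr
    intro a b ha hb
    simp only [g1, Int.toNat_natCast, Int.toNat_one, ite_apply]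
    split_ifs <;> (try rfl) <;> (try omega) <;> (try simp_all) <;> omega

-- one row of A's second loop
lemma loopA2inner (n r t : Nat) (hr : 2 ≤ r) (hrn : r < n) (ht : 3 + t ≤ n) :
    (PySem.List.pyRange 3 ((3 + t : Nat) : Int) 1).foldl
      (fun dp j =>
        if (r : Int) > j then
          PySem.List.pySetD dp (r : Int) (PySem.List.pySetD (PySem.List.pyGetD dp (r : Int) []) j
            ((PySem.List.pyGetD (PySem.List.pyGetD dp ((r : Int) - 1) []) j 0 * (r : Int)) % 1000000007))
        else
          PySem.List.pySetD dp (r : Int) (PySem.List.pySetD (PySem.List.pyGetD dp (r : Int) []) j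
            ((PySem.List.pyGetD (PySem.List.pyGetD dp ((r : Int) - 1) []) j 0 * (r : Int)
              + PySem.List.pyGetD (PySem.List.pyGetD dp (r : Int) []) (j - (r : Int)) 0) % 1000000007)))
      (mtab n (g2 r 3))
    = mtab n (g2 r (3 + t)) := by
  induction t with
  | zero =>
    rw [show (((3 + 0 : Nat)) : Int) = 3 by norm_num, PySem.List.pyRange_one_eq_nil le_rfl,
      List.foldl_nil]
  | succ t ih =>
    rw [show (((3 + (t + 1) : Nat)) : Int) = ((3 + t : Nat) : Int) + 1 by push_cast; ring,
      PySem.List.pyRange_one_succ_right (by omega), List.foldl_append,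
      ih (by omega), List.foldl_cons, List.foldl_nil]
    have hrm1 : (r : Int) - 1 = ((r - 1 : Nat) : Int) := by push_cast; omega
    have c1 : (0 : Int) ≤ (r : Int) := by omega
    have c2 : (r : Int) < (n : Int) := by omega
    have c3 : (0 : Int) ≤ ((r - 1 : Nat) : Int) := by omega
    have c4 : ((r - 1 : Nat) : Int) < (n : Int) := by omega
    have c5 : (0 : Int) ≤ ((3 + t : Nat) : Int) := by omega
    have c6 : ((3 + t : Nat) : Int) < (n : Int) := by omega
    have hval1 : g2 r (3 + t) (r - 1) (3 + t) = pvF (r - 1) (3 + t) := by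
      simp only [g2]; split_ifs <;> (try rfl) <;> omega
    by_cases hgt : (3 + t : Nat) < r
    · rw [if_pos (by omega : (r : Int) > ((3 + t : Nat) : Int))]
      rw [hrm1,
        mtab_get n (g2 r (3 + t)) (r : Int) c1 c2,
        mtab_get n (g2 r (3 + t)) ((r - 1 : Nat) : Int) c3 c4,
        mrow_get n (g2 r (3 + t) ((r - 1 : Nat) : Int).toNat) ((3 + t : Nat) : Int) 0 c5 c6]
      simp only [Int.toNat_natCast]
      rw [hval1, pvF_step_gt r (3 + t) hr (by omega) hgt,
        mrow_set n _ _ _ (by omega) (by omega),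
        mtab_set n _ _ _ (by omega) (by omega)]
      apply mtab_congr
      intro a b ha hb
      simp only [g2, Int.toNat_natCast, ite_apply]
      split_ifs <;> (try rfl) <;> (try omega) <;> (try simp_all) <;> omega
    · rw [if_neg (by omega : ¬ (r : Int) > ((3 + t : Nat) : Int))]
      have hjr : ((3 + t : Nat) : Int) - (r : Int) = ((3 + t - r : Nat) : Int) := by
        push_cast; omega
      have c7 : (0 : Int) ≤ ((3 + t - r : Nat) : Int) := by omega
      have c8 : ((3 + t - r : Nat) : Int) < (n : Int) := by omega
      rw [hrm1, hjr,
        mtab_get n (g2 r (3 + t)) (r : Int) c1 c2,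
        mtab_get n (g2 r (3 + t)) ((r - 1 : Nat) : Int) c3 c4,
        mrow_get n (g2 r (3 + t) ((r - 1 : Nat) : Int).toNat) ((3 + t : Nat) : Int) 0 c5 c6,
        mrow_get n (g2 r (3 + t) ((r : Int)).toNat) ((3 + t - r : Nat) : Int) 0 c7 c8]
      simp only [Int.toNat_natCast]
      have hval2 : g2 r (3 + t) r (3 + t - r) = (if 3 ≤ 3 + t - r then pvF r (3 + t - r) else 0) := by
        by_cases h : 3 ≤ 3 + t - r
        · rw [if_pos h]; simp only [g2]
          rw [if_neg (show ¬(1 ≤ r ∧ r < r ∧ 3 ≤ 3 + t - r) from by omega)]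
          rw [if_pos (show True ∧ 3 ≤ 3 + t - r ∧ 3 + t - r < 3 + t from ⟨trivial, h, by omega⟩)]
        · rw [if_neg h]; simp only [g2]
          rw [if_neg (show ¬(1 ≤ r ∧ r < r ∧ 3 ≤ 3 + t - r) from by omega)]
          rw [if_neg (show ¬(True ∧ 3 ≤ 3 + t - r ∧ 3 + t - r < 3 + t) from fun hc => h hc.2.1)]
      rw [hval1, hval2,
        pvF_step_le r (3 + t) hr (by omega) (by omega),
        mrow_set n _ _ _ (by omega) (by omega),
        mtab_set n _ _ _ (by omega) (by omega)]
      apply mtab_congr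
      intro a b ha hb
      simp only [g2, Int.toNat_natCast, ite_apply]
      split_ifs <;> (try rfl) <;> (try omega) <;> (try simp_all) <;> omega


lemma loopA2 (n t : Nat) (hn : 2 + t ≤ n) :
    (PySem.List.pyRange 2 ((2 + t : Nat) : Int) 1).foldl
      (fun dp i =>
        (PySem.List.pyRange 3 ((n : Nat) : Int) 1).foldl
          (fun dp j =>
            if i > j then
              PySem.List.pySetD dp i (PySem.List.pySetD (PySem.List.pyGetD dp i []) j
                ((PySem.List.pyGetD (PySem.List.pyGetD dp (i - 1) []) j 0 * i) % 1000000007))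
            else
              PySem.List.pySetD dp i (PySem.List.pySetD (PySem.List.pyGetD dp i []) j
                ((PySem.List.pyGetD (PySem.List.pyGetD dp (i - 1) []) j 0 * i
                  + PySem.List.pyGetD (PySem.List.pyGetD dp i []) (j - i) 0) % 1000000007))) dp)
      (mtab n (gG 1))
    = mtab n (gG (1 + t)) := by
  induction t with
  | zero =>
    rw [show (((2 + 0 : Nat)) : Int) = 2 by norm_num, PySem.List.pyRange_one_eq_nil le_rfl,
      List.foldl_nil]
  | succ t ih =>
    rw [show (((2 + (t + 1) : Nat)) : Int) = ((2 + t : Nat) : Int) + 1 by push_cast; ring,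
      PySem.List.pyRange_one_succ_right (by omega), List.foldl_append,
      ih (by omega), List.foldl_cons, List.foldl_nil]
    have hstart : mtab n (gG (1 + t)) = mtab n (g2 (2 + t) 3) := by
      apply mtab_congr
      intro a b ha hb
      simp only [gG, g2]
      split_ifs <;> (try rfl) <;> (try omega) <;> (try simp_all) <;> omega
    rw [hstart]
    have hn3 : ((n : Nat) : Int) = ((3 + (n - 3) : Nat) : Int) := by push_cast; omega
    rw [hn3]
    have L := loopA2inner n (2 + t) (n - 3) (by omega) (by omega) (by omega)
    rw [L]
    apply mtab_congr
    intro a b ha hb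
    simp only [gG, g2]
    split_ifs <;> (try rfl) <;> (try omega) <;> (try simp_all) <;> omega

lemma dp0_eq (n : Nat) :
    (PySem.List.pyRange 0 ((n : Nat) : Int) 1).map
      (fun _ => (PySem.List.pyRange 0 ((n : Nat) : Int) 1).map (fun _ => (0 : Int)))
    = mtab n gInit := by
  simp [PySem.List.pyRange_one, List.map_map, mtab, mrow, gInit, Function.comp]


lemma solveA (N : Nat) : solve ((N : Nat) : Int) = pvF N N := by
  have hcast : ((N : Nat) : Int) + 1 = ((N + 1 : Nat) : Int) := by push_cast; ring
  simp only [solve, hcast, show ((10 : Int) ^ 9 + 7) = 1000000007 by norm_num,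
    PySem.Int.mod_eq_emod_of_pos (show (0 : Int) < 1000000007 by norm_num)]
  rw [dp0_eq (N + 1)]
  by_cases h3 : 3 ≤ N
  · have L1 := loopA1 (N + 1) (N - 2) (by omega)
    rw [show ((3 + (N - 2) : Nat) : Int) = ((N + 1 : Nat) : Int) by push_cast; omega] at L1
    rw [L1]
    have hG1 : mtab (N + 1) (g1 (3 + (N - 2))) = mtab (N + 1) (gG 1) := by
      apply mtab_congr
      intro a b ha hb
      simp only [g1, gG]
      by_cases hab : a = 1 ∧ 3 ≤ b
      · rw [if_pos ⟨hab.1, hab.2, by omega⟩, if_pos ⟨by omega, by omega, hab.2⟩, hab.1,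
          pvF_one b hab.2]
      · rw [if_neg (fun hc => hab ⟨hc.1, hc.2.1⟩), if_neg (fun hc => hab ⟨by omega, hc.2.2⟩)]
    rw [hG1]
    have L2 := loopA2 (N + 1) (N - 1) (by omega)
    rw [show ((2 + (N - 1) : Nat) : Int) = ((N + 1 : Nat) : Int) by push_cast; omega] at L2
    rw [L2]
    rw [mtab_get (N + 1) (gG (1 + (N - 1))) ((N : Nat) : Int) (by omega) (by omega),
      mrow_get (N + 1) _ ((N : Nat) : Int) 0 (by omega) (by omega)]
    simp only [Int.toNat_natCast]
    show gG (1 + (N - 1)) N N = pvF N N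
    simp only [gG]
    rw [show 1 + (N - 1) = N by omega, if_pos (by omega)]
  · rw [PySem.List.pyRange_one_eq_nil (show ((N + 1 : Nat) : Int) ≤ 3 by push_cast; omega)]
    simp only [List.foldl_nil, PySem.List.foldl_ignore]
    rw [mtab_get (N + 1) gInit ((N : Nat) : Int) (by omega) (by omega),
      mrow_get (N + 1) _ ((N : Nat) : Int) 0 (by omega) (by omega)]
    rw [pvF_small N N (by omega)]
    rfl

-- B-side invariants
def hB (P : Nat) : Nat → Int := fun x => (pvW P x : Int) % 1000000007
def invB (P T : Nat) : Nat → Int := fun x =>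
  if x < T then (pvW P x : Int) % 1000000007 else (pvW (P - 1) x : Int) % 1000000007

lemma w0_eq (N : Nat) :
    ([1] ++ PySem.List.pyRepeat [(0 : Int)] ((N : Nat) : Int)) = mrow (N + 1) (hB 1) := by
  rw [PySem.List.pyRepeat_singleton]
  simp only [Int.toNat_natCast]
  apply List.ext_getElem
  · simp [mrow]
  · intro k hk hk'
    simp only [mrow, List.getElem_map, List.getElem_range]
    cases k with
    | zero => simp [hB, pvW]
    | succ k =>
      have hlt : k < N := by simpa [List.length_replicate] using hk
      simp [hB, pvW]

lemma loopB1 (n P t : Nat) (hP : 2 ≤ P) (ht : P + t ≤ n) :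
    (PySem.List.pyRange ((P : Nat) : Int) ((P + t : Nat) : Int) 1).foldl
      (fun w j => PySem.List.pySetD w j
        ((PySem.List.pyGetD w j 0 + PySem.List.pyGetD w (j - ((P : Nat) : Int)) 0) % 1000000007))
      (mrow n (invB P P))
    = mrow n (invB P (P + t)) := by
  induction t with
  | zero =>
    rw [show ((P + 0 : Nat) : Int) = ((P : Nat) : Int) by norm_num,
      PySem.List.pyRange_one_eq_nil le_rfl, List.foldl_nil]
    rfl
  | succ t ih =>
    rw [show ((P + (t + 1) : Nat) : Int) = ((P + t : Nat) : Int) + 1 by push_cast; ring,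
      PySem.List.pyRange_one_succ_right (by omega), List.foldl_append,
      ih (by omega), List.foldl_cons, List.foldl_nil]
    have hjP : ((P + t : Nat) : Int) - ((P : Nat) : Int) = ((t : Nat) : Int) := by
      push_cast; omega
    have c5 : (0 : Int) ≤ ((P + t : Nat) : Int) := by omega
    have c6 : ((P + t : Nat) : Int) < (n : Int) := by omega
    have c7 : (0 : Int) ≤ ((t : Nat) : Int) := by omega
    have c8 : ((t : Nat) : Int) < (n : Int) := by omega
    rw [hjP,
      mrow_get n (invB P (P + t)) ((P + t : Nat) : Int) 0 c5 c6,
      mrow_get n (invB P (P + t)) ((t : Nat) : Int) 0 c7 c8]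
    simp only [Int.toNat_natCast]
    have hv1 : invB P (P + t) (P + t) = (pvW (P - 1) (P + t) : Int) % 1000000007 := by
      simp only [invB]; rw [if_neg (by omega)]
    have hv2 : invB P (P + t) t = (pvW P t : Int) % 1000000007 := by
      simp only [invB]; rw [if_pos (by omega)]
    have hW : pvW P (P + t) = pvW (P - 1) (P + t) + pvW P t := by
      obtain ⟨q, rfl⟩ : ∃ q, P = q + 2 := ⟨P - 2, by omega⟩
      have e1 : q + 2 + t - (q + 2) = t := by omega
      have e2 : q + 2 - 1 = q + 1 := by omega
      rw [pvW, if_pos (by omega : q + 2 ≤ q + 2 + t), e1, e2]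
    have hval : (invB P (P + t) (P + t) + invB P (P + t) t) % 1000000007
        = (pvW P (P + t) : Int) % 1000000007 := by
      rw [hv1, hv2, hW]
      have hm : Int.ModEq 1000000007
          ((pvW (P - 1) (P + t) : Int) % 1000000007 + (pvW P t : Int) % 1000000007)
          ((pvW (P - 1) (P + t) : Int) + (pvW P t : Int)) :=
        Int.ModEq.add (emod_self_modEq _ _) (emod_self_modEq _ _)
      rw [hm]
      congr 1 <;> push_cast <;> try ring
    rw [hval, mrow_set n _ _ _ (by omega) (by omega)]
    apply mrow_congr
    intro x hx
    simp only [invB, Int.toNat_natCast]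
    split_ifs <;> (try rfl) <;> (try omega) <;> (try simp_all) <;> omega

lemma loopB2 (n t : Nat) (hn : 2 + t ≤ n) :
    (PySem.List.pyRange 2 ((2 + t : Nat) : Int) 1).foldl
      (fun w part =>
        (PySem.List.pyRange part ((n : Nat) : Int) 1).foldl
          (fun w j => PySem.List.pySetD w j
            ((PySem.List.pyGetD w j 0 + PySem.List.pyGetD w (j - part) 0) % 1000000007)) w)
      (mrow n (hB 1))
    = mrow n (hB (1 + t)) := by
  induction t with
  | zero =>
    rw [show ((2 + 0 : Nat) : Int) = 2 by norm_num, PySem.List.pyRange_one_eq_nil le_rfl,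
      List.foldl_nil]
  | succ t ih =>
    rw [show ((2 + (t + 1) : Nat) : Int) = ((2 + t : Nat) : Int) + 1 by push_cast; ring,
      PySem.List.pyRange_one_succ_right (by omega), List.foldl_append,
      ih (by omega), List.foldl_cons, List.foldl_nil]
    have hstart : mrow n (hB (1 + t)) = mrow n (invB (2 + t) (2 + t)) := by
      apply mrow_congr
      intro x hx
      simp only [hB, invB]
      by_cases hxP : x < 2 + t
      · rw [if_pos hxP, pvW_of_lt (2 + t) x (by omega) hxP,
          show (2 + t) - 1 = 1 + t by omega]
      · rw [if_neg hxP, show (2 + t) - 1 = 1 + t by omega]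
    rw [hstart]
    have L := loopB1 n (2 + t) (n - (2 + t)) (by omega) (by omega)
    rw [show (((2 + t) + (n - (2 + t)) : Nat) : Int) = ((n : Nat) : Int) by push_cast; omega] at L
    rw [L]
    apply mrow_congr
    intro x hx
    simp only [hB, invB]
    rw [if_pos (by omega : x < (2 + t) + (n - (2 + t))), show 1 + (t + 1) = 2 + t by omega]

lemma loopBf (t : Nat) :
    (PySem.List.pyRange 2 ((2 + t : Nat) : Int) 1).foldl
      (fun f k => (f * k) % 1000000007) 1
    = ((1 + t).factorial : Int) % 1000000007 := by
  induction t with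
  | zero =>
    rw [show ((2 + 0 : Nat) : Int) = 2 by norm_num, PySem.List.pyRange_one_eq_nil le_rfl,
      List.foldl_nil]
    norm_num [Nat.factorial]
  | succ t ih =>
    rw [show ((2 + (t + 1) : Nat) : Int) = ((2 + t : Nat) : Int) + 1 by push_cast; ring,
      PySem.List.pyRange_one_succ_right (by omega), List.foldl_append,
      ih, List.foldl_cons, List.foldl_nil]
    have hfac : (1 + (t + 1)).factorial = (1 + t).factorial * (2 + t) := by
      rw [show 1 + (t + 1) = (1 + t) + 1 by omega, Nat.factorial_succ]
      ring
    rw [hfac]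
    have hm : Int.ModEq 1000000007
        (((1 + t).factorial : Int) % 1000000007 * ((2 + t : Nat) : Int))
        (((1 + t).factorial : Int) * ((2 + t : Nat) : Int)) :=
      (emod_self_modEq _ _).mul_right _
    rw [hm]
    congr 1 <;> push_cast <;> try ring

lemma solveB (N : Nat) (h3 : 3 ≤ N) : solve_alt ((N : Nat) : Int) = pvF N N := by
  have hcast : ((N : Nat) : Int) + 1 = ((N + 1 : Nat) : Int) := by push_cast; ring
  simp only [solve_alt, hcast, show ((10 : Int) ^ 9 + 7) = 1000000007 by norm_num,
    PySem.Int.mod_eq_emod_of_pos (show (0 : Int) < 1000000007 by norm_num)]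
  rw [if_neg (show ¬ ((N : Nat) : Int) < 3 by omega)]
  rw [w0_eq N]
  have L2 := loopB2 (N + 1) (N - 1) (by omega)
  rw [show ((2 + (N - 1) : Nat) : Int) = ((N + 1 : Nat) : Int) by push_cast; omega,
    show 1 + (N - 1) = N by omega] at L2
  rw [L2]
  rw [show ((N : Nat) : Int) - 2 = ((N - 2 : Nat) : Int) by push_cast; omega,
    PySem.List.slice_to_natCast]
  have htake : (mrow (N + 1) (hB N)).take (N - 2) = (List.range (N - 2)).map (hB N) := by
    have hmin : min (N - 2) (N + 1) = N - 2 := by omega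
    simp only [mrow, ← List.map_take, List.take_range, hmin]
  rw [htake]
  have htot : (((List.range (N - 2)).map (hB N)).sum) % 1000000007
      = ((pvS N N : Nat) : Int) % 1000000007 := by
    have hsum : ((List.range (N - 2)).map (hB N)).sum = ∑ x ∈ Finset.range (N - 2), hB N x := rfl
    rw [hsum]
    simp only [hB]
    rw [← Finset.sum_int_mod]
    congr 1
    rw [pvS]
    push_cast
    rfl
  rw [htot]
  have Lf := loopBf (N - 1)
  rw [show ((2 + (N - 1) : Nat) : Int) = ((N + 1 : Nat) : Int) by push_cast; omega,
    show 1 + (N - 1) = N by omega] at Lf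
  rw [Lf]
  have hm : Int.ModEq 1000000007
      ((N.factorial : Int) % 1000000007 * (((pvS N N : Nat) : Int) % 1000000007))
      ((N.factorial : Int) * ((pvS N N : Nat) : Int)) :=
    Int.ModEq.mul (emod_self_modEq _ _) (emod_self_modEq _ _)
  rw [pvF, hm]
  congr 1 <;> push_cast <;> try ring

-- ===== VERDICT (by name: the statements are the Claim_ definitions above) =====
theorem solve_spec : Claim_equal_solve := by
  intro s _ hpre
  unfold Spec_solve
  unfold Pre_solve at hpre
  obtain ⟨N, rfl⟩ : ∃ N : Nat, s = ((N : Nat) : Int) := ⟨s.toNat, (Int.toNat_of_nonneg hpre).symm⟩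
  by_cases h3 : 3 ≤ N
  · rw [solveA N, solveB N h3]
  · rw [solveA N]
    have hz : solve_alt ((N : Nat) : Int) = 0 := by
      simp only [solve_alt]
      rw [if_pos (by omega : ((N : Nat) : Int) < 3)]
    rw [hz, pvF_small N N (by omega)]
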